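-- pv_equiv track=rewrite | github.com/taraharyono/RSA-Instant-Messaging | RSA1.py | ByteIntArrayToBlocks2
-- ===== SOURCE A (Python) =====
-- def ByteIntArrayToBlocks2(byteint_array, size):
--     if (size == 1):
--         return byteint_array
--     else:
--         blocked_byteintarray = []
--         for i in range(0, len(byteint_array), size):
--             block = ""
--
--             for j in range(size):
--                 if ((i+j) < len(byteint_array)):
--                     if (byteint_array[i+j]<10):
--                         block += "00" + str(byteint_array[i+j])
--                     elif (byteint_array[i+j] < 100):
--                         block += "0" + str(byteint_array[i+j])
--                     else:
--                         block += str(byteint_array[i+j])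
--                 else:
--                     block += str(ord('\0'))
--
--             blocked_byteintarray.append(int(block))
--         return blocked_byteintarray
-- ===== SOURCE B (Python) =====
-- def ByteIntArrayToBlocks2(byteint_array, size):
--     if size == 1:
--         return byteint_array
--     pieces = ["0" * (3 - len(str(b))) + str(b) for b in byteint_array]
--     blocked_byteintarray = []
--     for i in range(0, len(pieces), size):
--         chunk = pieces[i:i + size]
--         blocked_byteintarray.append(int("".join(chunk) + "0" * (size - len(chunk))))
--     return blocked_byteintarray
-- ===== Notes on version B (the rewrite author's own statement) =====
-- stated objective: simpler
-- what changed: B replaces A's nested index loops with per-position bounds checks and an if/elif/else padding chain by one comprehension that zero-pads every byte to (at least) three digits once, then slices the padded pieces into chunks and joins each chunk with closed-form '0'*(size-len(chunk)) tail padding.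
import Mathlib
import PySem

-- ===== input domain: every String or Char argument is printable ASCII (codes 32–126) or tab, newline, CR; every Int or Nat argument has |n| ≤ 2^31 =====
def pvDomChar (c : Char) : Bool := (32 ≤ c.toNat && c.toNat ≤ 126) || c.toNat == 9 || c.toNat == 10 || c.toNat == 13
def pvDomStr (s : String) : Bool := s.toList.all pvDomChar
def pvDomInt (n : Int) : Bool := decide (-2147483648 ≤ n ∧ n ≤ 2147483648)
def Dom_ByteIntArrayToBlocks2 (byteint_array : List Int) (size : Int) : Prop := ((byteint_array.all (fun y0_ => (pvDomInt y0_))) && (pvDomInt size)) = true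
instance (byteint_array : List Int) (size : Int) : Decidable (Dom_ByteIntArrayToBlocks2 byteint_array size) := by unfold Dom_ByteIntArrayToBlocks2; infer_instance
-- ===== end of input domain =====

-- B replaces A's nested loops (with per-position bounds checks and an if/elif padding chain)
-- by one pass that zero-pads each byte to at least three digits, then slices chunks and joins
-- them with closed-form tail padding; objective: simpler. Return-value equivalence only (neither mutates).

-- ===== PORT A =====
-- literal transliteration of A; int(block) is PySem.Int.ofChars? (always `some` under Pre_,
-- the .getD 0 default is never used there); str(ord('\0')) = "0" is PySem.Int.toChars 0
def ByteIntArrayToBlocks2 (byteint_array : List Int) (size : Int) : List Int :=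
  if size = 1 then byteint_array
  else
    (PySem.List.pyRange 0 (PySem.List.len byteint_array) size).foldl (fun blocked i =>
      blocked ++ [(PySem.Int.ofChars?
        ((PySem.List.pyRange 0 size).foldl (fun block j =>
          if i + j < PySem.List.len byteint_array then
            if PySem.List.pyGetD byteint_array (i + j) 0 < 10 then
              block ++ ('0' :: '0' :: PySem.Int.toChars (PySem.List.pyGetD byteint_array (i + j) 0))
            else if PySem.List.pyGetD byteint_array (i + j) 0 < 100 then
              block ++ ('0' :: PySem.Int.toChars (PySem.List.pyGetD byteint_array (i + j) 0))
            else
              block ++ PySem.Int.toChars (PySem.List.pyGetD byteint_array (i + j) 0)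
          else block ++ PySem.Int.toChars 0) [])).getD 0]) []

-- ===== PORT B =====
-- literal transliteration of Source B; "0" * k is List.replicate k.toNat '0' (Python's k ≤ 0 gives "")
def ByteIntArrayToBlocks2_alt (byteint_array : List Int) (size : Int) : List Int :=
  if size = 1 then byteint_array
  else
    (PySem.List.pyRange 0 (PySem.List.len (byteint_array.map (fun b =>
        List.replicate (3 - PySem.Chars.len (PySem.Int.toChars b)).toNat '0' ++ PySem.Int.toChars b))) size).foldl
      (fun blocked i =>
        blocked ++ [(PySem.Int.ofChars?
          (PySem.Chars.join []
              (PySem.List.slice (byteint_array.map (fun b =>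
                List.replicate (3 - PySem.Chars.len (PySem.Int.toChars b)).toNat '0' ++ PySem.Int.toChars b))
                (some i) (some (i + size)))
            ++ List.replicate (size - PySem.List.len
              (PySem.List.slice (byteint_array.map (fun b =>
                List.replicate (3 - PySem.Chars.len (PySem.Int.toChars b)).toNat '0' ++ PySem.Int.toChars b))
                (some i) (some (i + size)))).toNat '0')).getD 0]) []

-- ===== PRECONDITION & SPEC =====
-- Pre_ excludes exactly the inputs on which the Python A raises: size == 0 (range step 0,
-- ValueError) and a positive block size ≥ 2 with some negative element, where the '-' lands
-- inside the block string and int(block) raises ValueError.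
def Pre_ByteIntArrayToBlocks2 (byteint_array : List Int) (size : Int) : Prop :=
  size = 1 ∨ size < 0 ∨ (2 ≤ size ∧ ∀ b ∈ byteint_array, 0 ≤ b)
instance (byteint_array : List Int) (size : Int) : Decidable (Pre_ByteIntArrayToBlocks2 byteint_array size) := by unfold Pre_ByteIntArrayToBlocks2; infer_instance

def pvWitness_ByteIntArrayToBlocks2 : List Int × Int := ([7, 42, 200, 1000, 0], 2)

def Spec_ByteIntArrayToBlocks2 (byteint_array : List Int) (size : Int) (out : List Int) : Prop := out = ByteIntArrayToBlocks2_alt byteint_array size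
instance (byteint_array : List Int) (size : Int) (out : List Int) : Decidable (Spec_ByteIntArrayToBlocks2 byteint_array size out) := by unfold Spec_ByteIntArrayToBlocks2; infer_instance

-- ===== CLAIM (what is proved, stated in full; the proofs are below) =====
def Claim_equal_ByteIntArrayToBlocks2 : Prop := ∀ (byteint_array : List Int) (size : Int), Dom_ByteIntArrayToBlocks2 byteint_array size → Pre_ByteIntArrayToBlocks2 byteint_array size → Spec_ByteIntArrayToBlocks2 byteint_array size (ByteIntArrayToBlocks2 byteint_array size)

-- ===== LEMMAS AND PROOFS =====

-- A's three-way padded piece for one byte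
def pieceA (b : Int) : List Char :=
  if b < 10 then '0' :: '0' :: PySem.Int.toChars b
  else if b < 100 then '0' :: PySem.Int.toChars b
  else PySem.Int.toChars b

-- B's zero-padded piece for one byte
def pieceB (b : Int) : List Char :=
  List.replicate (3 - PySem.Chars.len (PySem.Int.toChars b)).toNat '0' ++ PySem.Int.toChars b

lemma tdc_length : ∀ (f n : Nat) (ds : List Char), n < f →
    (Nat.toDigitsCore 10 f n ds).length = Nat.log 10 n + 1 + ds.length := by
  intro f
  induction f with
  | zero => intro n ds h; omega
  | succ f ih =>
    intro n ds h
    by_cases h10 : n / 10 = 0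
    · have hn : n < 10 := by omega
      simp [Nat.toDigitsCore, h10, Nat.log_eq_zero_iff.mpr (Or.inl hn), Nat.add_comm]
    · have hn : 10 ≤ n := by
        by_contra hc
        exact h10 (Nat.div_eq_of_lt (by omega))
      have hrec : Nat.toDigitsCore 10 (f+1) n ds
          = Nat.toDigitsCore 10 f (n / 10) ((n % 10).digitChar :: ds) := by
        simp [Nat.toDigitsCore, h10]
      rw [hrec, ih (n / 10) _ (by omega)]
      have hlog : Nat.log 10 (n / 10) = Nat.log 10 n - 1 := Nat.log_div_base 10 n
      have hpos : 0 < Nat.log 10 n := Nat.log_pos (by omega) hn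
      simp only [List.length_cons]
      omega

lemma toDigits_length (n : Nat) : (Nat.toDigits 10 n).length = Nat.log 10 n + 1 := by
  simpa using tdc_length (n + 1) n [] (by omega)

lemma toChars_length (b : Int) (hb : 0 ≤ b) :
    (PySem.Int.toChars b).length = Nat.log 10 b.toNat + 1 := by
  rw [PySem.Int.toChars, if_neg (by omega), toDigits_length]

lemma piece_eq (b : Int) (hb : 0 ≤ b) : pieceB b = pieceA b := by
  unfold pieceA pieceB
  rw [PySem.Chars.len_eq, toChars_length b hb]
  by_cases h1 : b < 10
  · have : Nat.log 10 b.toNat = 0 := Nat.log_eq_zero_iff.mpr (Or.inl (by omega))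
    rw [if_pos h1, this]
    rfl
  · by_cases h2 : b < 100
    · have : Nat.log 10 b.toNat = 1 :=
        Nat.log_eq_of_pow_le_of_lt_pow (by simpa using (by omega : 10 ≤ b.toNat)) (by norm_num; omega)
      rw [if_neg h1, if_pos h2, this]
      rfl
    · have h100 : (10 : Nat) ^ 2 ≤ b.toNat := by norm_num; omega
      have : 2 ≤ Nat.log 10 b.toNat :=
        (Nat.le_log_iff_pow_le (b := 10) (x := 2) (y := b.toNat) (by norm_num) (by omega)).mpr h100
      rw [if_neg h1, if_neg h2]
      have hz : ((3 : Int) - (↑(Nat.log 10 b.toNat + 1) : Int)).toNat = 0 := by omega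
      rw [hz]
      rfl

lemma join_nil_flatten (parts : List (List Char)) : PySem.Chars.join [] parts = parts.flatten := by
  induction parts with
  | nil => simp [PySem.Chars.join, List.intercalate]
  | cons a rest ih =>
    cases rest with
    | nil => simp [PySem.Chars.join, List.intercalate]
    | cons b rest' =>
      rw [PySem.Chars.join_cons_cons]
      simp only [List.flatten_cons]
      rw [ih]
      simp

lemma flatMap_range_getD {α β : Type} (t : List α) (p : α → List β) (d : α) :
    (List.range t.length).flatMap (fun k => p (t.getD k d)) = t.flatMap p := by
  induction t with
  | nil => simp
  | cons a t ih =>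
    rw [List.length_cons, List.range_succ_eq_map]
    simp only [List.flatMap_cons, List.flatMap_map]
    simpa using congrArg (fun l => p a ++ l) ih

lemma flatMap_eq_replicate {α : Type} (l : List α) (g : α → List Char) (c : Char)
    (h : ∀ x ∈ l, g x = [c]) : l.flatMap g = List.replicate l.length c := by
  induction l with
  | nil => simp
  | cons a l ih =>
    rw [List.flatMap_cons, h a List.mem_cons_self, List.length_cons, List.replicate_succ,
      ih (fun x hx => h x (List.mem_cons_of_mem a hx))]
    rfl

-- the inner loop of A builds exactly B's joined-and-padded chunk string
lemma block_eq (arr : List Int) (size i : Int) (hs : 2 ≤ size)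
    (hnn : ∀ b ∈ arr, 0 ≤ b) (hi0 : 0 ≤ i) (hin : i < (arr.length : Int)) :
    (PySem.List.pyRange 0 size).foldl (fun block j =>
        if i + j < PySem.List.len arr then
          if PySem.List.pyGetD arr (i + j) 0 < 10 then
            block ++ ('0' :: '0' :: PySem.Int.toChars (PySem.List.pyGetD arr (i + j) 0))
          else if PySem.List.pyGetD arr (i + j) 0 < 100 then
            block ++ ('0' :: PySem.Int.toChars (PySem.List.pyGetD arr (i + j) 0))
          else
            block ++ PySem.Int.toChars (PySem.List.pyGetD arr (i + j) 0)
        else block ++ PySem.Int.toChars 0) []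
    = PySem.Chars.join [] (PySem.List.slice (arr.map pieceB) (some i) (some (i + size)))
      ++ List.replicate (size - PySem.List.len
          (PySem.List.slice (arr.map pieceB) (some i) (some (i + size)))).toNat '0' := by
  -- notation
  set n₀ := arr.length with hn₀
  obtain ⟨i₀, rfl⟩ : ∃ i₀ : Nat, i = (i₀ : Int) := ⟨i.toNat, (Int.toNat_of_nonneg hi0).symm⟩
  obtain ⟨s, rfl⟩ : ∃ s : Nat, size = (s : Int) := ⟨size.toNat, (Int.toNat_of_nonneg (by omega)).symm⟩
  have hi₀ : i₀ < n₀ := by exact_mod_cast hin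
  -- the inner fold appends a fixed piece per index: turn it into a flatMap over range s
  have hfun : (fun (block : List Char) (j : Int) =>
      if (i₀ : Int) + j < PySem.List.len arr then
        if PySem.List.pyGetD arr ((i₀ : Int) + j) 0 < 10 then
          block ++ ('0' :: '0' :: PySem.Int.toChars (PySem.List.pyGetD arr ((i₀ : Int) + j) 0))
        else if PySem.List.pyGetD arr ((i₀ : Int) + j) 0 < 100 then
          block ++ ('0' :: PySem.Int.toChars (PySem.List.pyGetD arr ((i₀ : Int) + j) 0))
        else
          block ++ PySem.Int.toChars (PySem.List.pyGetD arr ((i₀ : Int) + j) 0)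
      else block ++ PySem.Int.toChars 0)
      = (fun block j => block ++
          (if (i₀ : Int) + j < PySem.List.len arr
            then pieceA (PySem.List.pyGetD arr ((i₀ : Int) + j) 0)
            else ['0'])) := by
    funext block j
    unfold pieceA
    split_ifs <;> rfl
  rw [hfun, PySem.List.foldl_append_eq_flatMap, List.nil_append, PySem.List.pyRange_one]
  rw [List.flatMap_map]
  simp only [Int.sub_zero]
  -- the slice is a take/drop of the mapped pieces, i.e. the pieces of t
  set t := (arr.drop i₀).take s with ht
  have hslice : PySem.List.slice (arr.map pieceB) (some (i₀ : Int)) (some ((i₀ : Int) + (s : Int)))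
      = t.map pieceB := by
    rw [PySem.List.slice_natCast_add, ht, ← List.map_drop, ← List.map_take]
  have hmapB : t.map pieceB = t.map pieceA :=
    List.map_congr_left (fun b hb => piece_eq b (hnn b (List.mem_of_mem_drop (List.mem_of_mem_take hb))))
  set m := t.length with hm
  have hmlen : m = min s (n₀ - i₀) := by
    rw [hm, ht]
    simp [hn₀]
  have hms : m ≤ s := by omega
  -- split range s at m
  have hsplit : List.range s = List.range m ++ (List.range (s - m)).map (fun k => m + k) := by
    rw [← List.range_add (n := m) (m := s - m), Nat.add_sub_cancel' hms]
  simp only [Int.toNat_natCast, zero_add]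
  rw [hsplit, List.flatMap_append]
  -- rewrite the right-hand side into two flatMaps as well
  rw [hslice, hmapB, join_nil_flatten, ← List.flatMap_def]
  have hlen2 : PySem.List.len (List.map pieceA t) = ((m : Nat) : Int) := by
    simp [PySem.List.len_eq, hm]
  rw [hlen2]
  have hrep : (((s : Nat) : Int) - ((m : Nat) : Int)).toNat = s - m := by omega
  rw [hrep]
  congr 1
  · -- in-range positions produce exactly the pieces of the chunk t
    rw [← flatMap_range_getD t pieceA 0, ← hm]
    simp only [List.flatMap_def]
    congr 1
    apply List.map_congr_left
    intro k hk
    have hkm : k < m := List.mem_range.mp hk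
    have hcond : ((i₀ : Int)) + (k : Int) < PySem.List.len arr := by
      rw [PySem.List.len_eq]; omega
    rw [if_pos hcond]
    have hidx : ((i₀ : Int)) + (k : Int) = ((i₀ + k : Nat) : Int) := by push_cast; ring
    rw [hidx, PySem.List.pyGetD_natCast]
    congr 1
    have hk1 : k < t.length := by omega
    have hk2 : i₀ + k < arr.length := by omega
    rw [List.getD_eq_getElem t 0 hk1, List.getD_eq_getElem arr 0 hk2]
    simp only [ht, List.getElem_take, List.getElem_drop]
  · -- padding positions all yield a single '0'
    rw [flatMap_eq_replicate _ _ '0' ?hc]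
    · simp
    case hc =>
      intro x hx
      obtain ⟨k, hk, rfl⟩ := List.mem_map.mp hx
      have hkm : k < s - m := List.mem_range.mp hk
      have hmn : m = n₀ - i₀ := by omega
      rw [if_neg]
      rw [PySem.List.len_eq]
      push_cast
      omega

lemma pyRange_neg_empty (b s : Int) (hb : 0 ≤ b) (hs : s < 0) : PySem.List.pyRange 0 b s = [] := by
  simp [PySem.List.pyRange, hs.ne, Int.not_lt.mpr hs.le, Int.not_lt.mpr hb]

-- ===== VERDICT (by name: the statement is the Claim_ definition above) =====
theorem ByteIntArrayToBlocks2_spec : Claim_equal_ByteIntArrayToBlocks2 := by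
  intro arr size hdom hpre
  unfold Spec_ByteIntArrayToBlocks2 ByteIntArrayToBlocks2 ByteIntArrayToBlocks2_alt
  by_cases h1 : size = 1
  · rw [if_pos h1, if_pos h1]
  · rw [if_neg h1, if_neg h1]
    have hpieces : (fun b => List.replicate (3 - PySem.Chars.len (PySem.Int.toChars b)).toNat '0'
        ++ PySem.Int.toChars b) = pieceB := rfl
    rw [hpieces]
    rcases hpre with h | h | ⟨h2, hnn⟩
    · exact absurd h h1
    · rw [pyRange_neg_empty _ _ (by rw [PySem.List.len_eq]; positivity) h,
        pyRange_neg_empty _ _ (by rw [PySem.List.len_eq]; positivity) h]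
      rfl
    · simp only [PySem.List.foldl_append_singleton_eq_map, List.nil_append]
      have hlen : PySem.List.len (arr.map pieceB) = PySem.List.len arr := by
        simp [PySem.List.len_eq]
      rw [hlen]
      apply List.map_congr_left
      intro i hi
      obtain ⟨hi0, hin, -⟩ := (PySem.List.mem_pyRange_iff_of_pos (by omega) i).mp hi
      rw [block_eq arr size i h2 hnn hi0 (by rw [PySem.List.len_eq] at hin; exact hin)]
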